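-- pv_equiv track=rewrite | github.com/GrafSpiel/GROMARK | k4_pattern_explorer.py | create_pattern_alphabet
-- ===== SOURCE A (Python) =====
-- K4_CIPHERTEXT = "OBKRUOXOGHULBSOLIFBBWFLRVQQPRNGKSSOTWTQSJQSSEKZZWATJKLUDIAWINFBNYPVTTMZFPKWGDKZXTJCDIGKUHUAUEKCAR"
--
-- def create_pattern_alphabet(base_alphabet, pattern, diff):
--     """
--     Create an alphabet with differences applied according to a pattern.
--
--     Args:
--         base_alphabet (str): Base alphabet (usually A-Z)
--         pattern (str): Pattern descriptor (e.g., 'every3rd', 'every2nd', 'column1')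
--         diff (int): Difference to apply to the shifted letters
--
--     Returns:
--         list: Custom alphabets for each position
--     """
--     alphabets = []
--
--     for i in range(len(K4_CIPHERTEXT)):
--         if pattern == 'every3rd' and i % 3 == 0:
--             # Apply shift to every 3rd letter
--             shifted = ''.join(chr(((ord(c) - ord('A') + diff) % 26) + ord('A')) for c in base_alphabet)
--             alphabets.append(shifted)
--         elif pattern == 'every2nd' and i % 2 == 0:
--             # Apply shift to every 2nd letter
--             shifted = ''.join(chr(((ord(c) - ord('A') + diff) % 26) + ord('A')) for c in base_alphabet)
--             alphabets.append(shifted)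
--         elif pattern == 'every4th' and i % 4 == 0:
--             # Apply shift to every 4th letter
--             shifted = ''.join(chr(((ord(c) - ord('A') + diff) % 26) + ord('A')) for c in base_alphabet)
--             alphabets.append(shifted)
--         elif pattern.startswith('column') and len(pattern) > 6:
--             # Apply shift to specific column in width 21 layout
--             col = int(pattern[6:])
--             if (i % 21) == col:
--                 shifted = ''.join(chr(((ord(c) - ord('A') + diff) % 26) + ord('A')) for c in base_alphabet)
--                 alphabets.append(shifted)
--             else:
--                 alphabets.append(base_alphabet)
--         else:
--             alphabets.append(base_alphabet)
--
--     return alphabets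
-- ===== SOURCE B (Python) =====
-- K4_CIPHERTEXT = "OBKRUOXOGHULBSOLIFBBWFLRVQQPRNGKSSOTWTQSJQSSEKZZWATJKLUDIAWINFBNYPVTTMZFPKWGDKZXTJCDIGKUHUAUEKCAR"
--
-- def create_pattern_alphabet(base_alphabet, pattern, diff):
--     n = len(K4_CIPHERTEXT)
--     # parse the pattern once into a (start, step) stride, or None for no matches
--     stride = None
--     if pattern == 'every2nd':
--         stride = (0, 2)
--     elif pattern == 'every3rd':
--         stride = (0, 3)
--     elif pattern == 'every4th':
--         stride = (0, 4)
--     elif pattern.startswith('column') and len(pattern) > 6: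
--         col = int(pattern[6:])
--         if 0 <= col <= 20:
--             stride = (col, 21)
--     result = [base_alphabet] * n
--     if stride is not None:
--         shifted = ''.join(chr(((ord(c) - ord('A') + diff) % 26) + ord('A')) for c in base_alphabet)
--         for i in range(stride[0], n, stride[1]):
--             result[i] = shifted
--     return result
-- ===== Notes on version B (the rewrite author's own statement) =====
-- stated objective: alternative
-- what changed: B parses the pattern once into an optional (start, step) stride, computes the shifted alphabet once, prefills the result with the base alphabet and overwrites only the matching stride positions, instead of A's scan over all 97 positions through a branch chain that recomputes the shifted alphabet at every matching position.
import Mathlib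
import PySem

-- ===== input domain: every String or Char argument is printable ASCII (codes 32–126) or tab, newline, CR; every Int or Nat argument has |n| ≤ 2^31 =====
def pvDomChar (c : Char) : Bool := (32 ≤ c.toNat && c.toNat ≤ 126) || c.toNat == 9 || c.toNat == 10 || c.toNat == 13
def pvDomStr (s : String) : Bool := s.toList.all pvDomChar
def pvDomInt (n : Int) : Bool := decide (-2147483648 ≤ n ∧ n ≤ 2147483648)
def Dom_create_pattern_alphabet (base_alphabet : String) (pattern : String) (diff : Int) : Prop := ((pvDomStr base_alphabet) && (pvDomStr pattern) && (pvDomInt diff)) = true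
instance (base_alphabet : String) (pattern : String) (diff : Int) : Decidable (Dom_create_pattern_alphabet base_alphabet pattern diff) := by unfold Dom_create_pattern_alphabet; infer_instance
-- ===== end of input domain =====

-- B parses the pattern once into an optional (start, step) stride and overwrites only the matching
-- positions of a prefilled list with a once-computed shifted alphabet, instead of A's scan of all 97
-- positions through a branch chain recomputing the shift (objective: simpler/alternative decomposition).

def pvK4 : String := "OBKRUOXOGHULBSOLIFBBWFLRVQQPRNGKSSOTWTQSJQSSEKZZWATJKLUDIAWINFBNYPVTTMZFPKWGDKZXTJCDIGKUHUAUEKCAR"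

-- hand port of ''.join(chr(((ord(c) - ord('A') + diff) % 26) + ord('A')) for c in base_alphabet):
-- exact, since the produced code is always in 65..90 (valid chr / Char.ofNat range)
def pvShift (base_alphabet : String) (diff : Int) : String :=
  String.ofList (base_alphabet.toList.map (fun c =>
    Char.ofNat ((PySem.Int.mod ((c.toNat : Int) - 65 + diff) 26 + 65).toNat)))

-- ===== PORT A =====
def create_pattern_alphabet (base_alphabet : String) (pattern : String) (diff : Int) : List String :=
  (PySem.List.pyRange 0 (PySem.Str.len pvK4) 1).foldl (fun alphabets i =>
    if pattern = "every3rd" ∧ PySem.Int.mod i 3 = 0 then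
      alphabets ++ [pvShift base_alphabet diff]
    else if pattern = "every2nd" ∧ PySem.Int.mod i 2 = 0 then
      alphabets ++ [pvShift base_alphabet diff]
    else if pattern = "every4th" ∧ PySem.Int.mod i 4 = 0 then
      alphabets ++ [pvShift base_alphabet diff]
    else if PySem.Str.startswith pattern "column" = true ∧ PySem.Str.len pattern > 6 then
      -- int(pattern[6:]); a ValueError there is excluded by Pre_, so .getD 0 is never taken inside Pre_
      let col := (PySem.Int.ofStr? (PySem.Str.slice pattern (some 6) none)).getD 0
      if PySem.Int.mod i 21 = col then alphabets ++ [pvShift base_alphabet diff]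
      else alphabets ++ [base_alphabet]
    else alphabets ++ [base_alphabet]) []

-- ===== PORT B =====
def create_pattern_alphabet_alt (base_alphabet : String) (pattern : String) (diff : Int) : List String :=
  let n : Int := PySem.Str.len pvK4
  let stride : Option (Int × Int) :=
    if pattern = "every2nd" then some (0, 2)
    else if pattern = "every3rd" then some (0, 3)
    else if pattern = "every4th" then some (0, 4)
    else if PySem.Str.startswith pattern "column" = true ∧ PySem.Str.len pattern > 6 then
      -- int(pattern[6:]); a ValueError there is excluded by Pre_, so .getD 0 is never taken inside Pre_
      let col := (PySem.Int.ofStr? (PySem.Str.slice pattern (some 6) none)).getD 0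
      if 0 ≤ col ∧ col ≤ 20 then some (col, 21) else none
    else none
  let result := List.replicate n.toNat base_alphabet
  match stride with
  | none => result
  | some (s, st) =>
      let shifted := pvShift base_alphabet diff
      (PySem.List.pyRange s n st).foldl (fun acc i => PySem.List.pySetD acc i shifted) result

-- ===== PRECONDITION & SPEC =====
-- Pre_ excludes exactly the inputs where pattern starts with 'column' with a non-integer tail,
-- on which both A and B raise ValueError at int(pattern[6:]).
def Pre_create_pattern_alphabet (base_alphabet : String) (pattern : String) (diff : Int) : Prop :=
  (PySem.Str.startswith pattern "column" = true ∧ PySem.Str.len pattern > 6) →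
    (PySem.Int.ofStr? (PySem.Str.slice pattern (some 6) none)).isSome = true
instance (base_alphabet : String) (pattern : String) (diff : Int) : Decidable (Pre_create_pattern_alphabet base_alphabet pattern diff) := by unfold Pre_create_pattern_alphabet; infer_instance

def pvWitness_create_pattern_alphabet : String × String × Int := ("ABCDEFGHIJKLMNOPQRSTUVWXYZ", "column3", 5)

def Spec_create_pattern_alphabet (base_alphabet : String) (pattern : String) (diff : Int) (out : List String) : Prop := out = create_pattern_alphabet_alt base_alphabet pattern diff
instance (base_alphabet : String) (pattern : String) (diff : Int) (out : List String) : Decidable (Spec_create_pattern_alphabet base_alphabet pattern diff out) := by unfold Spec_create_pattern_alphabet; infer_instance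

-- ===== CLAIM (what is proved, stated in full; the proofs are below) =====
def Claim_equal_create_pattern_alphabet : Prop := ∀ (base_alphabet : String) (pattern : String) (diff : Int), Dom_create_pattern_alphabet base_alphabet pattern diff → Pre_create_pattern_alphabet base_alphabet pattern diff → Spec_create_pattern_alphabet base_alphabet pattern diff (create_pattern_alphabet base_alphabet pattern diff)

-- ===== LEMMAS AND PROOFS =====

-- per-position value of A's loop body
def pvElA (base_alphabet pattern : String) (diff : Int) (i : Int) : String :=
  if pattern = "every3rd" ∧ PySem.Int.mod i 3 = 0 then pvShift base_alphabet diff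
  else if pattern = "every2nd" ∧ PySem.Int.mod i 2 = 0 then pvShift base_alphabet diff
  else if pattern = "every4th" ∧ PySem.Int.mod i 4 = 0 then pvShift base_alphabet diff
  else if PySem.Str.startswith pattern "column" = true ∧ PySem.Str.len pattern > 6 then
    if PySem.Int.mod i 21 = (PySem.Int.ofStr? (PySem.Str.slice pattern (some 6) none)).getD 0
    then pvShift base_alphabet diff else base_alphabet
  else base_alphabet

lemma pvK4_len : PySem.Str.len pvK4 = 97 := by decide

lemma pvFlatMap_singleton_map {α β : Type} (f : α → β) (l : List α) :
    l.flatMap (fun x => [f x]) = l.map f := by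
  induction l with
  | nil => rfl
  | cons a t ih => simp [List.flatMap_cons, ih]

lemma A_norm (b p : String) (d : Int) :
    create_pattern_alphabet b p d = (PySem.List.pyRange 0 97 1).map (pvElA b p d) := by
  unfold create_pattern_alphabet
  rw [pvK4_len]
  have hstep : ∀ (acc : List String) (i : Int),
      (if p = "every3rd" ∧ PySem.Int.mod i 3 = 0 then acc ++ [pvShift b d]
       else if p = "every2nd" ∧ PySem.Int.mod i 2 = 0 then acc ++ [pvShift b d]
       else if p = "every4th" ∧ PySem.Int.mod i 4 = 0 then acc ++ [pvShift b d]
       else if PySem.Str.startswith p "column" = true ∧ PySem.Str.len p > 6 then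
         let col := (PySem.Int.ofStr? (PySem.Str.slice p (some 6) none)).getD 0
         if PySem.Int.mod i 21 = col then acc ++ [pvShift b d] else acc ++ [b]
       else acc ++ [b]) = acc ++ [pvElA b p d i] := by
    intro acc i
    simp only [pvElA]
    split_ifs <;> rfl
  rw [funext fun acc => funext fun i => hstep acc i]
  rw [PySem.List.foldl_append_eq_flatMap]
  rw [pvFlatMap_singleton_map]
  simp

lemma foldl_pySetD_getElem? (v : String) :
    ∀ (idxs : List Int), (∀ i ∈ idxs, 0 ≤ i) → ∀ (xs : List String) (k : Nat),
      (idxs.foldl (fun acc i => PySem.List.pySetD acc i v) xs)[k]? =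
        if (k : Int) ∈ idxs then (if k < xs.length then some v else none) else xs[k]? := by
  intro idxs
  induction idxs with
  | nil => intro _ xs k; simp
  | cons i rest ih =>
    intro h xs k
    have hi : 0 ≤ i := h i (by simp)
    simp only [List.foldl_cons]
    rw [PySem.List.pySetD_of_nonneg xs v hi]
    rw [ih (fun j hj => h j (by simp [hj])) (xs.set i.toNat v) k]
    by_cases hk : (k : Int) ∈ rest
    · simp [hk, List.length_set]
    · by_cases hki : (k : Int) = i
      · have : i.toNat = k := by omega
        simp [hki, List.getElem?_set, this]
      · have : i.toNat ≠ k := by omega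
        simp [hk, hki, this]

-- the column number A and B parse from the pattern
def pvColOf (p : String) : Int := (PySem.Int.ofStr? (PySem.Str.slice p (some 6) none)).getD 0

lemma elA_every2nd (b : String) (d k : Int) :
    pvElA b "every2nd" d k = if PySem.Int.mod k 2 = 0 then pvShift b d else b := by
  unfold pvElA
  rw [if_neg (fun h => absurd h.1 (by decide))]
  by_cases hm : PySem.Int.mod k 2 = 0
  · rw [if_pos ⟨rfl, hm⟩, if_pos hm]
  · rw [if_neg (fun h => hm h.2), if_neg (fun h => absurd h.1 (by decide)),
      if_neg (fun h => absurd h.1 (by decide)), if_neg hm]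

lemma elA_every3rd (b : String) (d k : Int) :
    pvElA b "every3rd" d k = if PySem.Int.mod k 3 = 0 then pvShift b d else b := by
  unfold pvElA
  by_cases hm : PySem.Int.mod k 3 = 0
  · rw [if_pos ⟨rfl, hm⟩, if_pos hm]
  · rw [if_neg (fun h => hm h.2), if_neg (fun h => absurd h.1 (by decide)),
      if_neg (fun h => absurd h.1 (by decide)), if_neg (fun h => absurd h.1 (by decide)),
      if_neg hm]

lemma elA_every4th (b : String) (d k : Int) :
    pvElA b "every4th" d k = if PySem.Int.mod k 4 = 0 then pvShift b d else b := by
  unfold pvElA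
  rw [if_neg (fun h => absurd h.1 (by decide)), if_neg (fun h => absurd h.1 (by decide))]
  by_cases hm : PySem.Int.mod k 4 = 0
  · rw [if_pos ⟨rfl, hm⟩, if_pos hm]
  · rw [if_neg (fun h => hm h.2), if_neg (fun h => absurd h.1 (by decide)), if_neg hm]

lemma elA_column (b p : String) (d k : Int) (hp3 : p ≠ "every3rd") (hp2 : p ≠ "every2nd")
    (hp4 : p ≠ "every4th")
    (hc : PySem.Str.startswith p "column" = true ∧ PySem.Str.len p > 6) :
    pvElA b p d k = if PySem.Int.mod k 21 = pvColOf p then pvShift b d else b := by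
  unfold pvElA pvColOf
  rw [if_neg (fun h => hp3 h.1), if_neg (fun h => hp2 h.1), if_neg (fun h => hp4 h.1), if_pos hc]

lemma elA_default (b p : String) (d k : Int) (hp3 : p ≠ "every3rd") (hp2 : p ≠ "every2nd")
    (hp4 : p ≠ "every4th")
    (hc : ¬ (PySem.Str.startswith p "column" = true ∧ PySem.Str.len p > 6)) :
    pvElA b p d k = b := by
  unfold pvElA
  rw [if_neg (fun h => hp3 h.1), if_neg (fun h => hp2 h.1), if_neg (fun h => hp4 h.1), if_neg hc]

lemma L_side (f : Int → String) (k : Nat) :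
    ((PySem.List.pyRange 0 97 1).map f)[k]? = if k < 97 then some (f k) else none := by
  by_cases hk : k < 97
  · rw [if_pos hk, show (97 : Int) = ((97 : Nat) : Int) from by norm_num,
      PySem.List.getElem?_map_pyRange_zero f 97 k hk]
  · rw [if_neg hk]
    apply List.getElem?_eq_none
    have h : (PySem.List.pyRange 0 97 1).length = 97 := by decide
    simp [h]; omega

lemma B_side (b v : String) (s st : Int) (hst : 0 < st) (hs : 0 ≤ s) (k : Nat) :
    ((PySem.List.pyRange s 97 st).foldl (fun acc i => PySem.List.pySetD acc i v)
        (List.replicate (Int.toNat 97) b))[k]? =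
      if k < 97 then some (if (k : Int) ∈ PySem.List.pyRange s 97 st then v else b) else none := by
  have hnn : ∀ i ∈ PySem.List.pyRange s 97 st, 0 ≤ i := by
    intro i hi
    have := (PySem.List.mem_pyRange_iff_of_pos hst i).1 hi
    omega
  rw [foldl_pySetD_getElem? v _ hnn]
  by_cases hm : (k : Int) ∈ PySem.List.pyRange s 97 st
  · have hk : k < 97 := by
      have := (PySem.List.mem_pyRange_iff_of_pos hst _).1 hm
      omega
    simp [hm, hk]
  · rw [if_neg hm, List.getElem?_replicate]
    by_cases hk : k < 97
    · rw [if_pos hk, if_pos (by omega), if_neg hm]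
    · rw [if_neg hk, if_neg (by omega)]

theorem create_pattern_alphabet_spec : Claim_equal_create_pattern_alphabet := by
  intro b p d _ _
  unfold Spec_create_pattern_alphabet
  rw [A_norm]
  simp only [create_pattern_alphabet_alt, pvK4_len]
  by_cases hp2 : p = "every2nd"
  · subst hp2
    simp only [String.reduceEq, reduceIte]
    apply List.ext_getElem?
    intro k
    rw [B_side b (pvShift b d) 0 2 (by norm_num) le_rfl, L_side]
    by_cases hk : k < 97
    · rw [if_pos hk, if_pos hk]
      have hk' : (k : Int) < 97 := by exact_mod_cast hk
      have hiff : (PySem.Int.mod (k : Int) 2 = 0) ↔ ((k : Int) ∈ PySem.List.pyRange 0 97 2) := by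
        rw [PySem.Int.mod_eq_emod_of_pos (show (0:Int) < 2 from by norm_num),
          PySem.List.mem_pyRange_iff_of_pos (show (0:Int) < 2 from by norm_num)]
        omega
      rw [elA_every2nd, if_congr hiff rfl rfl]
    · rw [if_neg hk, if_neg hk]
  · by_cases hp3 : p = "every3rd"
    · subst hp3
      simp only [String.reduceEq, reduceIte]
      apply List.ext_getElem?
      intro k
      rw [B_side b (pvShift b d) 0 3 (by norm_num) le_rfl, L_side]
      by_cases hk : k < 97
      · rw [if_pos hk, if_pos hk]
        have hk' : (k : Int) < 97 := by exact_mod_cast hk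
        have hiff : (PySem.Int.mod (k : Int) 3 = 0) ↔ ((k : Int) ∈ PySem.List.pyRange 0 97 3) := by
          rw [PySem.Int.mod_eq_emod_of_pos (show (0:Int) < 3 from by norm_num),
            PySem.List.mem_pyRange_iff_of_pos (show (0:Int) < 3 from by norm_num)]
          omega
        rw [elA_every3rd, if_congr hiff rfl rfl]
      · rw [if_neg hk, if_neg hk]
    · by_cases hp4 : p = "every4th"
      · subst hp4
        simp only [String.reduceEq, reduceIte]
        apply List.ext_getElem?
        intro k
        rw [B_side b (pvShift b d) 0 4 (by norm_num) le_rfl, L_side]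
        by_cases hk : k < 97
        · rw [if_pos hk, if_pos hk]
          have hk' : (k : Int) < 97 := by exact_mod_cast hk
          have hiff : (PySem.Int.mod (k : Int) 4 = 0) ↔ ((k : Int) ∈ PySem.List.pyRange 0 97 4) := by
            rw [PySem.Int.mod_eq_emod_of_pos (show (0:Int) < 4 from by norm_num),
              PySem.List.mem_pyRange_iff_of_pos (show (0:Int) < 4 from by norm_num)]
            omega
          rw [elA_every4th, if_congr hiff rfl rfl]
        · rw [if_neg hk, if_neg hk]
      · by_cases hc : PySem.Str.startswith p "column" = true ∧ PySem.Str.len p > 6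
        · rw [if_neg hp2, if_neg hp3, if_neg hp4, if_pos hc]
          by_cases hcol : 0 ≤ pvColOf p ∧ pvColOf p ≤ 20
          · rw [show (if 0 ≤ (PySem.Int.ofStr? (PySem.Str.slice p (some 6) none)).getD 0 ∧
                (PySem.Int.ofStr? (PySem.Str.slice p (some 6) none)).getD 0 ≤ 20 then
                some ((PySem.Int.ofStr? (PySem.Str.slice p (some 6) none)).getD 0, (21:Int))
                else none) = some (pvColOf p, (21:Int)) from by
              rw [if_pos (by exact hcol)]; rfl]
            apply List.ext_getElem?
            intro k
            rw [B_side b (pvShift b d) (pvColOf p) 21 (by norm_num) hcol.1, L_side]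
            by_cases hk : k < 97
            · rw [if_pos hk, if_pos hk]
              have hk' : (k : Int) < 97 := by exact_mod_cast hk
              have hiff : (PySem.Int.mod (k : Int) 21 = pvColOf p) ↔
                  ((k : Int) ∈ PySem.List.pyRange (pvColOf p) 97 21) := by
                rw [PySem.Int.mod_eq_emod_of_pos (show (0:Int) < 21 from by norm_num),
                  PySem.List.mem_pyRange_iff_of_pos (show (0:Int) < 21 from by norm_num)]
                obtain ⟨h1, h2⟩ := hcol
                omega
              rw [elA_column b p d k hp3 hp2 hp4 hc, if_congr hiff rfl rfl]
            · rw [if_neg hk, if_neg hk]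
          · rw [show (if 0 ≤ (PySem.Int.ofStr? (PySem.Str.slice p (some 6) none)).getD 0 ∧
                (PySem.Int.ofStr? (PySem.Str.slice p (some 6) none)).getD 0 ≤ 20 then
                some ((PySem.Int.ofStr? (PySem.Str.slice p (some 6) none)).getD 0, (21:Int))
                else none) = (none : Option (Int × Int)) from by
              rw [if_neg (by exact hcol)]]
            apply List.ext_getElem?
            intro k
            rw [L_side, List.getElem?_replicate]
            by_cases hk : k < 97
            · have hk' : (k : Int) < 97 := by exact_mod_cast hk
              rw [if_pos hk, elA_column b p d k hp3 hp2 hp4 hc,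
                if_neg (by
                  rw [PySem.Int.mod_eq_emod_of_pos (show (0:Int) < 21 from by norm_num)]
                  omega),
                if_pos (by omega)]
            · rw [if_neg hk, if_neg (by omega)]
        · rw [if_neg hp2, if_neg hp3, if_neg hp4, if_neg hc]
          apply List.ext_getElem?
          intro k
          rw [L_side, List.getElem?_replicate]
          by_cases hk : k < 97
          · rw [if_pos hk, elA_default b p d k hp3 hp2 hp4 hc, if_pos (by omega)]
          · rw [if_neg hk, if_neg (by omega)]
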